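-- pv_equiv track=rewrite | github.com/saurabh-pandey/AlgoAndDS | leetcode/arrays/find_N_and_double_a2.py | find_N_and_double
-- ===== SOURCE A (Python) =====
-- from typing import List
--
-- def find_N_and_double(nums: List[int]) -> bool:
--     for i, n in enumerate(nums):
--         for _, m in enumerate(nums[i + 1:]):
--             if n == 2 * m:
--                 return True
--             if m == 2 * n:
--                 return True
--     return False
-- ===== SOURCE B (Python) =====
-- def find_N_and_double(nums):
--     seen = set()
--     for x in nums:
--         if 2 * x in seen or (x % 2 == 0 and x // 2 in seen):
--             return True
--         seen.add(x)
--     return False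
-- ===== Notes on version B (the rewrite author's own statement) =====
-- stated objective: faster
-- what changed: Replaced the nested enumerate/slice scan over all pairs by a single pass that keeps a hash set of earlier elements and checks whether 2*x or (for even x) x//2 was already seen.
import Mathlib
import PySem

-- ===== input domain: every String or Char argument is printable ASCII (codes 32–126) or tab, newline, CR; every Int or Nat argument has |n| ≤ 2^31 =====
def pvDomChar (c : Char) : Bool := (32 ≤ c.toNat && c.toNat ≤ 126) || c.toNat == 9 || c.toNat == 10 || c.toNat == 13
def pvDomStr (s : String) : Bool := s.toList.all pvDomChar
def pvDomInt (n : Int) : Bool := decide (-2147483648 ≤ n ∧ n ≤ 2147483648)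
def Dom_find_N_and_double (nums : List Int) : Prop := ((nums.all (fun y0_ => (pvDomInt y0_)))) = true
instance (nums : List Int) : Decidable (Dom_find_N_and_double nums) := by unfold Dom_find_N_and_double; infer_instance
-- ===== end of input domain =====

-- B replaces A's quadratic nested scan over all pairs by a single pass with a set of
-- earlier elements, checking membership of 2*x and (for even x) x//2.  Objective: faster.

-- ===== PORT A =====
-- literal port of A: for i,n in enumerate(nums): for _,m in enumerate(nums[i+1:]): early-return True
def find_N_and_double (nums : List Int) : Bool :=
  (PySem.List.enumerate nums 0).any (fun p =>
    (PySem.List.enumerate (PySem.List.slice nums (some (p.1 + 1)) none) 0).any (fun q =>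
      p.2 == 2 * q.2 || q.2 == 2 * p.2))

-- ===== PORT B =====
-- B's loop: seen-set pass with early return
def altGo (seen : PySem.Set Int) : List Int → Bool
  | [] => false
  | x :: t =>
      if PySem.Set.contains seen (2 * x)
          || (PySem.Int.mod x 2 == 0 && PySem.Set.contains seen (PySem.Int.floordiv x 2)) then
        true
      else altGo (PySem.Set.add seen x) t

def find_N_and_double_alt (nums : List Int) : Bool := altGo PySem.Set.empty nums

-- ===== PRECONDITION & SPEC =====
def Spec_find_N_and_double (nums : List Int) (out : Bool) : Prop := out = find_N_and_double_alt nums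
instance (nums : List Int) (out : Bool) : Decidable (Spec_find_N_and_double nums out) := by unfold Spec_find_N_and_double; infer_instance

-- ===== CLAIM (what is proved, stated in full; the proofs are below) =====
def Claim_equal_find_N_and_double : Prop := ∀ (nums : List Int), Dom_find_N_and_double nums → Spec_find_N_and_double nums (find_N_and_double nums)

-- ===== LEMMAS AND PROOFS =====

-- the symmetric "one doubles the other" relation
def Rp (a b : Int) : Prop := a = 2 * b ∨ b = 2 * a

-- reference form: any ordered pair (head against its tail) satisfies the relation
def pairAny : List Int → Bool
  | [] => false
  | n :: t => t.any (fun m => n == 2 * m || m == 2 * n) || pairAny t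

lemma inner_enum2 (l : List Int) (a : Int) (s : Int) :
    (PySem.List.enumerate l s).any (fun q => a == 2 * q.2 || q.2 == 2 * a)
      = l.any (fun m => a == 2 * m || m == 2 * a) := by
  induction l generalizing s with
  | nil => simp [PySem.List.enumerate_nil]
  | cons x t ih => simp [PySem.List.enumerate_cons, ih]

lemma keyA (d : List Int) : ∀ (nums : List Int) (s : Nat), nums.drop s = d →
    (PySem.List.enumerate d (s : Int)).any (fun p =>
      (PySem.List.enumerate (PySem.List.slice nums (some (p.1 + 1)) none) 0).any (fun q =>
        p.2 == 2 * q.2 || q.2 == 2 * p.2)) = pairAny d := by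
  induction d with
  | nil => intro nums s _; simp [PySem.List.enumerate_nil, pairAny]
  | cons x t ih =>
      intro nums s h
      have ht : nums.drop (s + 1) = t := by
        rw [← List.drop_drop, h]
        rfl
      have hcast : (s : Int) + 1 = ((s + 1 : Nat) : Int) := by push_cast; ring
      simp only [PySem.List.enumerate_cons, List.any_cons]
      rw [hcast, PySem.List.slice_from_natCast, ht, inner_enum2 t x 0, ih nums (s + 1) ht]
      simp [pairAny]

-- A equals the reference pairAny
lemma A_eq_pairAny (nums : List Int) : find_N_and_double nums = pairAny nums := by
  have := keyA nums nums 0 (by simp)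
  simpa [find_N_and_double] using this

-- the branch condition of B's loop tests exactly Rp against the seen set
lemma cond_iff (x : Int) (seen : PySem.Set Int) :
    (PySem.Set.contains seen (2 * x)
      || (PySem.Int.mod x 2 == 0 && PySem.Set.contains seen (PySem.Int.floordiv x 2))) = true
    ↔ ∃ s ∈ seen, Rp x s := by
  simp only [Bool.or_eq_true, Bool.and_eq_true, PySem.Set.contains_iff, beq_iff_eq,
    PySem.Int.mod_eq_zero_iff_dvd]
  constructor
  · rintro (h | ⟨⟨c, hc⟩, h⟩)
    · exact ⟨2 * x, h, Or.inr rfl⟩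
    · refine ⟨PySem.Int.floordiv x 2, h, Or.inl ?_⟩
      have hd : PySem.Int.floordiv x 2 = c := by
        rw [PySem.Int.floordiv_eq_ediv_of_pos (by omega)]; omega
      omega
  · rintro ⟨s, hs, h | h⟩
    · refine Or.inr ⟨⟨s, by omega⟩, ?_⟩
      have hd : PySem.Int.floordiv x 2 = s := by
        rw [PySem.Int.floordiv_eq_ediv_of_pos (by omega)]; omega
      rwa [hd]
    · exact Or.inl (h ▸ hs)

lemma pairAny_cons (x : Int) (t : List Int) :
    pairAny (x :: t) = true ↔ (∃ m ∈ t, Rp x m) ∨ pairAny t = true := by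
  simp [pairAny, List.any_eq_true, Rp]

lemma Rp_symm {a b : Int} (h : Rp a b) : Rp b a := by
  rcases h with h | h
  · exact Or.inr h
  · exact Or.inl h

lemma altGo_iff (l : List Int) : ∀ (seen : PySem.Set Int),
    altGo seen l = true ↔ (∃ y ∈ l, ∃ s ∈ seen, Rp y s) ∨ pairAny l = true := by
  induction l with
  | nil => intro seen; simp [altGo, pairAny]
  | cons x t ih =>
      intro seen
      rw [altGo]
      split_ifs with hc
      · simp only [true_iff]
        exact Or.inl ⟨x, List.mem_cons_self .., (cond_iff x seen).mp hc⟩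
      · rw [ih (PySem.Set.add seen x), pairAny_cons]
        constructor
        · rintro (⟨y, hy, s, hs, hr⟩ | hp)
          · rcases (PySem.Set.mem_add _ _ _).mp hs with hs' | rfl
            · exact Or.inl ⟨y, List.mem_cons_of_mem _ hy, s, hs', hr⟩
            · exact Or.inr (Or.inl ⟨y, hy, Rp_symm hr⟩)
          · exact Or.inr (Or.inr hp)
        · rintro (⟨y, hy, s, hs, hr⟩ | ⟨m, hm, hr⟩ | hp)
          · rcases List.mem_cons.mp hy with rfl | hy'
            · exact absurd ((cond_iff y seen).mpr ⟨s, hs, hr⟩) hc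
            · exact Or.inl ⟨y, hy', s, (PySem.Set.mem_add _ _ _).mpr (Or.inl hs), hr⟩
          · exact Or.inl ⟨m, hm, x, (PySem.Set.mem_add _ _ _).mpr (Or.inr rfl), Rp_symm hr⟩
          · exact Or.inr hp

-- ===== VERDICT (by name: the statement is the Claim_ definition above) =====
theorem find_N_and_double_spec : Claim_equal_find_N_and_double := by
  intro nums _
  unfold Spec_find_N_and_double
  rw [A_eq_pairAny]
  have h := altGo_iff nums PySem.Set.empty
  simp only [PySem.Set.empty, List.not_mem_nil, false_and, exists_false, and_false,
    false_or] at h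
  have h2 : find_N_and_double_alt nums = true ↔ pairAny nums = true := by
    exact h
  cases hb : find_N_and_double_alt nums <;> cases hp : pairAny nums <;> simp_all
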